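-- pv_equiv track=rewrite | github.com/Jostan86/RobotSystems | line_follow_CV.py | check_for_2_consecutive_nones
-- ===== SOURCE A (Python) =====
-- def check_for_2_consecutive_nones(list_of_nones):
--     non_none_count = 0
--     last_non_none_index = None
--     for i, val in enumerate(list_of_nones):
--         if val is not None:
--             non_none_count += 1
--             if non_none_count > 2:
--                 return False
--             if last_non_none_index is not None and i - last_non_none_index != 1:
--                 return False
--             last_non_none_index = i
--     else:
--         return non_none_count == 2
-- ===== SOURCE B (Python) =====
-- def check_for_2_consecutive_nones(list_of_nones):
--     count = sum(1 for v in list_of_nones if v is not None)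
--     has_adjacent_pair = any(a is not None and b is not None
--                             for a, b in zip(list_of_nones, list_of_nones[1:]))
--     return count == 2 and has_adjacent_pair
-- ===== Notes on version B (the rewrite author's own statement) =====
-- stated objective: simpler
-- what changed: Replaces A's single stateful pass (running count, last-seen index, three early exits) by two index-free aggregate queries: count the non-None values and test whether any adjacent pair of the list is both non-None; the result is the conjunction 'count == 2 and some adjacent pair exists', which needs no index arithmetic at all.
import Mathlib
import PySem

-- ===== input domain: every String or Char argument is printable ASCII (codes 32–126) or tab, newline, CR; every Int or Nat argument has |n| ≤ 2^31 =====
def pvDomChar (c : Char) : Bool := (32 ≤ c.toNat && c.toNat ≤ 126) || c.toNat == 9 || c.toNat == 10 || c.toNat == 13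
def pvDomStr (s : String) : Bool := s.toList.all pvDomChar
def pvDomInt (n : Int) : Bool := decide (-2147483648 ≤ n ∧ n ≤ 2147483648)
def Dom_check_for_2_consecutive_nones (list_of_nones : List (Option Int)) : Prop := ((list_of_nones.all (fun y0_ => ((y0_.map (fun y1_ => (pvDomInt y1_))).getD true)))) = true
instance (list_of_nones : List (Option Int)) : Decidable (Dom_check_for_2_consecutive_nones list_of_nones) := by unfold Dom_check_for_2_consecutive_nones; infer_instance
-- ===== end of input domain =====

-- B replaces A's stateful early-exit pass (running count + last-seen index) by two index-free
-- aggregate queries — count of non-None values, and existence of an adjacent non-None pair —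
-- combined in one conjunction (objective: simpler).

-- ===== PORT A =====
-- A's for-loop with early returns, state: index i, non_none_count, last_non_none_index
def pvLoopA : List (Option Int) → Int → Int → Option Int → Bool
  | [], _, non_none_count, _ => non_none_count == 2
  | val :: rest, i, non_none_count, last_non_none_index =>
    match val with
    | none => pvLoopA rest (i + 1) non_none_count last_non_none_index
    | some _ =>
      let count' := non_none_count + 1
      if count' > 2 then false
      else if (match last_non_none_index with
               | some l => decide (i - l ≠ 1)
               | none => false) then false
      else pvLoopA rest (i + 1) count' (some i)

def check_for_2_consecutive_nones (list_of_nones : List (Option Int)) : Bool :=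
  pvLoopA list_of_nones 0 0 none

-- ===== PORT B =====
-- count = sum(1 for v in list_of_nones if v is not None)
-- has_adjacent_pair = any(a is not None and b is not None
--                         for a, b in zip(list_of_nones, list_of_nones[1:]))
-- return count == 2 and has_adjacent_pair
def check_for_2_consecutive_nones_alt (list_of_nones : List (Option Int)) : Bool :=
  let count : Nat := list_of_nones.countP (fun v => v.isSome)
  let has_adjacent_pair : Bool :=
    (list_of_nones.zip (PySem.List.slice list_of_nones (some 1) none)).any
      (fun p => p.1.isSome && p.2.isSome)
  decide (count = 2) && has_adjacent_pair

-- ===== PRECONDITION & SPEC =====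
def Spec_check_for_2_consecutive_nones (list_of_nones : List (Option Int)) (out : Bool) : Prop := out = check_for_2_consecutive_nones_alt list_of_nones
instance (list_of_nones : List (Option Int)) (out : Bool) : Decidable (Spec_check_for_2_consecutive_nones list_of_nones out) := by unfold Spec_check_for_2_consecutive_nones; infer_instance

-- ===== CLAIM (what is proved, stated in full; the proofs are below) =====
def Claim_equal_check_for_2_consecutive_nones : Prop := ∀ (list_of_nones : List (Option Int)), Dom_check_for_2_consecutive_nones list_of_nones → Spec_check_for_2_consecutive_nones list_of_nones (check_for_2_consecutive_nones list_of_nones)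

-- ===== LEMMAS AND PROOFS =====

-- indices of the non-none entries of the list, starting at offset s
def pvIdx : List (Option Int) → Int → List Int
  | [], _ => []
  | none :: rest, s => pvIdx rest (s + 1)
  | some _ :: rest, s => s :: pvIdx rest (s + 1)

-- the check A's loop computes on those indices
def pvCheck2 (l : List Int) : Bool :=
  decide (l.length = 2) && decide (l.getD 1 0 - l.getD 0 0 = 1)

theorem pvIdx_lb (xs : List (Option Int)) : ∀ s a : Int, a ∈ pvIdx xs s → s ≤ a := by
  induction xs with
  | nil => intro s a h; simp [pvIdx] at h
  | cons v rest ih =>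
    intro s a h
    cases v with
    | none => have := ih (s + 1) a h; omega
    | some x =>
      simp [pvIdx] at h
      rcases h with h | h
      · omega
      · have := ih (s + 1) a h; omega

theorem pvIdx_len (xs : List (Option Int)) : ∀ s : Int,
    (pvIdx xs s).length = xs.countP (fun v => v.isSome) := by
  induction xs with
  | nil => intro s; simp [pvIdx]
  | cons v rest ih =>
    intro s
    cases v <;> simp [pvIdx, ih]

-- adjacency test of B, as a named helper for the lemmas
def pvAdj (xs : List (Option Int)) : Bool :=
  (xs.zip xs.tail).any (fun p => p.1.isSome && p.2.isSome)

theorem pvIdx_pairwise (xs : List (Option Int)) : ∀ s : Int, (pvIdx xs s).Pairwise (· < ·) := by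
  induction xs with
  | nil => intro s; simp [pvIdx]
  | cons v rest ih =>
    intro s
    cases v with
    | none => exact ih (s + 1)
    | some x =>
      simp [pvIdx]
      exact ⟨fun a ha => by have := pvIdx_lb rest (s + 1) a ha; omega, ih (s + 1)⟩

theorem pvAdj_iff (xs : List (Option Int)) : ∀ s : Int,
    pvAdj xs = true ↔ ∃ a, a ∈ pvIdx xs s ∧ a + 1 ∈ pvIdx xs s := by
  induction xs with
  | nil => intro s; simp [pvAdj, pvIdx]
  | cons x rest ih =>
    intro s
    cases rest with
    | nil =>
      cases x <;> simp [pvAdj, pvIdx]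
    | cons y t =>
      have hzip : pvAdj (x :: y :: t) = ((x.isSome && y.isSome) || pvAdj (y :: t)) := by
        simp [pvAdj, List.zip]
      cases x with
      | none =>
        rw [hzip]
        simpa [pvIdx] using ih (s + 1)
      | some vx =>
        cases y with
        | none =>
          rw [hzip]
          have hiff := ih (s + 1)
          simp only [pvIdx] at hiff ⊢
          simp only [Option.isSome_some, Option.isSome_none, Bool.and_false, Bool.false_or]
          rw [hiff]
          constructor
          · rintro ⟨a, ha, hb⟩
            exact ⟨a, List.mem_cons_of_mem _ ha, List.mem_cons_of_mem _ hb⟩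
          · rintro ⟨a, ha, hb⟩
            rcases List.mem_cons.mp ha with ha | ha
            · exfalso
              rcases List.mem_cons.mp hb with hb | hb
              · omega
              · have := pvIdx_lb t (s + 1 + 1) (a + 1) hb; omega
            · refine ⟨a, ha, ?_⟩
              rcases List.mem_cons.mp hb with hb | hb
              · exfalso; have := pvIdx_lb t (s + 1 + 1) a ha; omega
              · exact hb
        | some vy =>
          rw [hzip]
          exact iff_of_true (by simp) ⟨s, by simp [pvIdx], by simp [pvIdx]⟩

theorem pvAlt_eq (xs : List (Option Int)) :
    check_for_2_consecutive_nones_alt xs = pvCheck2 (pvIdx xs 0) := by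
  unfold check_for_2_consecutive_nones_alt
  rw [PySem.List.slice_from_one]
  rw [show (xs.countP (fun v => v.isSome)) = (pvIdx xs 0).length from (pvIdx_len xs 0).symm]
  show (decide ((pvIdx xs 0).length = 2) && pvAdj xs) = pvCheck2 (pvIdx xs 0)
  have hp := pvIdx_pairwise xs 0
  have hadj := pvAdj_iff xs 0
  rcases hL : pvIdx xs 0 with _ | ⟨a, _ | ⟨b, _ | ⟨c, t⟩⟩⟩ <;> rw [hL] at hp hadj <;>
    simp [pvCheck2]
  -- two-element case: pvAdj xs = (b - a = 1)
  have hab : a < b := by simpa using hp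
  by_cases h1 : b - a = 1
  · have : pvAdj xs = true := hadj.mpr ⟨a, by simp, by simp; omega⟩
    simp [this, h1]
  · have : pvAdj xs = false := by
      cases hb : pvAdj xs
      · rfl
      · exfalso
        rcases hadj.mp hb with ⟨d, hd, hd1⟩
        simp [List.mem_cons] at hd hd1
        rcases hd with hd | hd <;> rcases hd1 with hd1 | hd1 <;> omega
    simp [this, h1]

theorem pvLoopA_char (xs : List (Option Int)) : ∀ i : Int,
    (pvLoopA xs i 0 none = pvCheck2 (pvIdx xs i)) ∧
    (∀ l : Int, pvLoopA xs i 1 (some l) = decide (pvIdx xs i = [l + 1])) ∧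
    (∀ l : Int, pvLoopA xs i 2 (some l) = decide (pvIdx xs i = [])) := by
  induction xs with
  | nil =>
    intro i
    refine ⟨?_, fun l => ?_, fun l => ?_⟩ <;> simp [pvLoopA, pvIdx, pvCheck2]
  | cons v rest ih =>
    intro i
    cases v with
    | none =>
      exact ⟨(ih (i + 1)).1, (ih (i + 1)).2.1, (ih (i + 1)).2.2⟩
    | some x =>
      refine ⟨?_, fun l => ?_, fun l => ?_⟩
      · -- count 0, last none
        have hb := (ih (i + 1)).2.1 i
        simp only [pvLoopA, pvIdx] at *
        norm_num
        rw [hb]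
        cases h : pvIdx rest (i + 1) with
        | nil => simp [pvCheck2]
        | cons a t =>
          cases t with
          | nil =>
            simp [pvCheck2]
            constructor <;> intro h' <;> omega
          | cons b t' =>
            simp [pvCheck2]
      · -- count 1, last some l
        have hc := (ih (i + 1)).2.2 i
        simp only [pvLoopA, pvIdx]
        norm_num
        by_cases hil : i - l = 1
        · have : i = l + 1 := by omega
          subst this
          simp [hil, hc]
        · simp [hil]
          intro h'
          omega
      · -- count 2, last some l
        simp [pvLoopA, pvIdx]

-- ===== VERDICT (by name: the statement is the Claim_ definition above) =====
theorem check_for_2_consecutive_nones_spec : Claim_equal_check_for_2_consecutive_nones := by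
  intro xs _
  show check_for_2_consecutive_nones xs = check_for_2_consecutive_nones_alt xs
  rw [pvAlt_eq, check_for_2_consecutive_nones]
  exact (pvLoopA_char xs 0).1
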